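-- pv_equiv track=rewrite | github.com/dlist7/advent-of-code-2022-python | day22a.py | update_east
-- ===== SOURCE A (Python) =====
-- def update_east(monkey_map, r0, c0, r, c):
--     if c < len(monkey_map[r]) - 1:
--         if monkey_map[r][c+1] == '.':
--             return (r,c+1)
--         elif monkey_map[r][c+1] == '#':
--             return (r0,c0)
--         else:
--             return update_east(monkey_map, r0, c0, r, c+1)
--     else:
--         if monkey_map[r][0] == '.':
--             return (r,0)
--         elif monkey_map[r][0] == '#':
--             return (r0,c0)
--         else:
--             return update_east(monkey_map, r0, c0, r, 0)
-- ===== SOURCE B (Python) =====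
-- def update_east(monkey_map, r0, c0, r, c):
--     # One flat scan of the cyclic inspection order instead of A's recursion:
--     # the columns east of c (wrapping to 0 when c is at the end), then the whole row.
--     row = monkey_map[r]
--     n = len(row)
--     start = c + 1 if c < n - 1 else 0
--     for j in list(range(start, n)) + list(range(0, n)):
--         t = row[j]
--         if t == '.':
--             return (r, j)
--         if t == '#':
--             return (r0, c0)
-- ===== Notes on version B (the rewrite author's own statement) =====
-- stated objective: simpler
-- what changed: Replaces A's two-branch tail recursion over the current column with one flat for-loop over the precomputed cyclic scan order range(c+1,n)+range(0,c+1), returning at the first '.' or '#'.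
import Mathlib
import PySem

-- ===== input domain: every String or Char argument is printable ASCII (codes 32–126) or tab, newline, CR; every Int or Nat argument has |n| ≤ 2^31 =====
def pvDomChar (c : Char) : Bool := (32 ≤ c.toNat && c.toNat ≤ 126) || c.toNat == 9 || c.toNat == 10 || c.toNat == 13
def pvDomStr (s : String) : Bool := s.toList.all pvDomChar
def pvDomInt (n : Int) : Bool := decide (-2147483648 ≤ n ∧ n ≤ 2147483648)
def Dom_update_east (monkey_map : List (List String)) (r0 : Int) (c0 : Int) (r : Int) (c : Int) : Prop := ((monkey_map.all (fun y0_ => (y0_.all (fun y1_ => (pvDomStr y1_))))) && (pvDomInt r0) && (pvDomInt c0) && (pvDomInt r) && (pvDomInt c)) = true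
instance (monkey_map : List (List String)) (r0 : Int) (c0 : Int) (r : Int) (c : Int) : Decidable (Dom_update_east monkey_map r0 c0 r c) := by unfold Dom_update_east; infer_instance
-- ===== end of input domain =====

-- B replaces A's two-branch tail recursion with one flat scan of the precomputed
-- cyclic index order (east of c, then wrapping from 0); objective: simpler.


-- ===== PORT A =====
-- A's recursion made total with fuel; the fuel chosen at entry is enough for every
-- input Pre_ admits (inside Pre_ the default (0,0) of exhausted fuel / IndexError is never reached).
def updateEastGo (monkey_map : List (List String)) (r0 : Int) (c0 : Int) (r : Int) :
    Nat → Int → Int × Int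
  | 0, _ => (0, 0)
  | fuel + 1, c =>
    let row := (PySem.List.pyGet? monkey_map r).getD []
    if c < (row.length : Int) - 1 then
      match PySem.List.pyGet? row (c + 1) with
      | none => (0, 0)   -- IndexError in Python; outside Pre_
      | some t =>
        if t = "." then (r, c + 1)
        else if t = "#" then (r0, c0)
        else updateEastGo monkey_map r0 c0 r fuel (c + 1)
    else
      match PySem.List.pyGet? row 0 with
      | none => (0, 0)   -- IndexError in Python; outside Pre_
      | some t =>
        if t = "." then (r, 0)
        else if t = "#" then (r0, c0)
        else updateEastGo monkey_map r0 c0 r fuel 0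

def update_east (monkey_map : List (List String)) (r0 : Int) (c0 : Int) (r : Int) (c : Int) : Int × Int :=
  let row := (PySem.List.pyGet? monkey_map r).getD []
  let n : Int := row.length
  updateEastGo monkey_map r0 c0 r
    (if c < n - 1 then (2 * n - 1 - c).toNat else row.length) c

-- ===== PORT B =====
-- the for-loop of Source B over a list of column indices, with early return
def scanRow (row : List String) (r0 : Int) (c0 : Int) (r : Int) : List Int → Int × Int
  | [] => (0, 0)          -- loop falls through: Python B returns None; outside Pre_
  | j :: rest =>
    match PySem.List.pyGet? row j with
    | none => (0, 0)      -- IndexError in Python; outside Pre_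
    | some t =>
      if t = "." then (r, j)
      else if t = "#" then (r0, c0)
      else scanRow row r0 c0 r rest

def update_east_alt (monkey_map : List (List String)) (r0 : Int) (c0 : Int) (r : Int) (c : Int) : Int × Int :=
  let row := (PySem.List.pyGet? monkey_map r).getD []
  let n : Int := row.length
  let start : Int := if c < n - 1 then c + 1 else 0
  scanRow row r0 c0 r (PySem.List.pyRange start n 1 ++ PySem.List.pyRange 0 n 1)

-- ===== PRECONDITION & SPEC =====
-- Pre_ = exactly the inputs on which Python A returns: row r exists (IndexError otherwise),
-- it contains a '.' or '#' tile (A recurses forever otherwise), and c+1 is not below -len(row)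
-- (the first recursive index A inspects; IndexError otherwise).
def Pre_update_east (monkey_map : List (List String)) (r0 : Int) (c0 : Int) (r : Int) (c : Int) : Prop :=
  ("." ∈ (PySem.List.pyGet? monkey_map r).getD [] ∨ "#" ∈ (PySem.List.pyGet? monkey_map r).getD []) ∧
  -((((PySem.List.pyGet? monkey_map r).getD []).length : Int) + 1) ≤ c
instance (monkey_map : List (List String)) (r0 : Int) (c0 : Int) (r : Int) (c : Int) : Decidable (Pre_update_east monkey_map r0 c0 r c) := by unfold Pre_update_east; infer_instance

def pvWitness_update_east : List (List String) × Int × Int × Int × Int := ([["x", "#", "."]], 7, 5, 0, 0)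

def Spec_update_east (monkey_map : List (List String)) (r0 : Int) (c0 : Int) (r : Int) (c : Int) (out : Int × Int) : Prop := out = update_east_alt monkey_map r0 c0 r c
instance (monkey_map : List (List String)) (r0 : Int) (c0 : Int) (r : Int) (c : Int) (out : Int × Int) : Decidable (Spec_update_east monkey_map r0 c0 r c out) := by unfold Spec_update_east; infer_instance

-- ===== CLAIM (what is proved, stated in full; the proofs are below) =====
def Claim_equal_update_east : Prop := ∀ (monkey_map : List (List String)) (r0 : Int) (c0 : Int) (r : Int) (c : Int), Dom_update_east monkey_map r0 c0 r c → Pre_update_east monkey_map r0 c0 r c → Spec_update_east monkey_map r0 c0 r c (update_east monkey_map r0 c0 r c)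

-- ===== LEMMAS AND PROOFS =====

-- does scanning column j end the loop (hit '.' / '#', or IndexError)?
def pvStop (row : List String) (j : Int) : Bool :=
  match PySem.List.pyGet? row j with
  | none => true
  | some t => t == "." || t == "#"

theorem scan_skip (row : List String) (r0 c0 r : Int) (l1 l2 : List Int)
    (h : ∀ j ∈ l1, pvStop row j = false) :
    scanRow row r0 c0 r (l1 ++ l2) = scanRow row r0 c0 r l2 := by
  induction l1 with
  | nil => rfl
  | cons j l1 ih =>
    have hj := h j (by simp)
    unfold pvStop at hj
    rcases hg : PySem.List.pyGet? row j with _ | t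
    · rw [hg] at hj; simp at hj
    · rw [hg] at hj
      simp only [beq_iff_eq, Bool.or_eq_false_iff, decide_eq_false_iff_not] at hj
      simp only [List.cons_append, scanRow, hg]
      rw [if_neg (by simpa using hj.1), if_neg (by simpa using hj.2)]
      exact ih (fun x hx => h x (by simp [hx]))

theorem scan_stop (row : List String) (r0 c0 r : Int) (l1 l2 : List Int)
    (h : ∃ j ∈ l1, pvStop row j = true) :
    scanRow row r0 c0 r (l1 ++ l2) = scanRow row r0 c0 r l1 := by
  induction l1 with
  | nil => simp at h
  | cons j l1 ih =>
    rcases hg : PySem.List.pyGet? row j with _ | t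
    · simp [List.cons_append, scanRow, hg]
    · simp only [List.cons_append, scanRow, hg]
      by_cases h1 : t = "."
      · simp [h1]
      · by_cases h2 : t = "#"
        · simp [h1, h2]
        · rw [if_neg h1, if_neg h2, if_neg h1, if_neg h2]
          apply ih
          rcases h with ⟨x, hx, hs⟩
          rcases List.mem_cons.mp hx with rfl | hx'
          · exfalso; unfold pvStop at hs; rw [hg] at hs; simp [h1, h2] at hs
          · exact ⟨x, hx', hs⟩

-- A's second cycle: from column k with fuel n-1-k, A inspects k+1, …, n-1.
theorem goW (mm : List (List String)) (r0 c0 r : Int) (row : List String)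
    (hrow : (PySem.List.pyGet? mm r).getD [] = row) :
    ∀ (fuel : Nat) (k : Nat), k < row.length → fuel = row.length - 1 - k →
      updateEastGo mm r0 c0 r fuel (k : Int) =
        scanRow row r0 c0 r (PySem.List.pyRange ((k : Int) + 1) (row.length : Int) 1) := by
  intro fuel
  induction fuel with
  | zero =>
    intro k hk hf
    have hk' : (k : Int) + 1 = (row.length : Int) := by omega
    rw [PySem.List.pyRange_one_eq_nil (by omega)]
    rfl
  | succ fuel ih =>
    intro k hk hf
    have hk2 : k + 1 < row.length := by omega
    unfold updateEastGo
    rw [hrow]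
    rw [if_pos (by push_cast; omega)]
    rw [PySem.List.pyRange_one_cons (by push_cast; omega)]
    have hcast : (k : Int) + 1 = ((k + 1 : Nat) : Int) := by push_cast; ring
    rcases hg : PySem.List.pyGet? row ((k : Int) + 1) with _ | t
    · simp only [scanRow, hg]
    · simp only [scanRow, hg]
      by_cases h1 : t = "."
      · simp [h1]
      · by_cases h2 : t = "#"
        · simp [h1, h2]
        · rw [if_neg h1, if_neg h2, if_neg h1, if_neg h2]
          rw [hcast, ih (k + 1) hk2 (by omega)]

-- the wrap step: from any column ≥ n-1, A inspects 0, 1, …, n-1.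
theorem goH (mm : List (List String)) (r0 c0 r : Int) (row : List String)
    (hrow : (PySem.List.pyGet? mm r).getD [] = row)
    (hn : 1 ≤ row.length) (c : Int) (hc : (row.length : Int) - 1 ≤ c) :
    updateEastGo mm r0 c0 r row.length c =
      scanRow row r0 c0 r (PySem.List.pyRange 0 (row.length : Int) 1) := by
  rcases hfe : row.length with _ | m
  · omega
  · unfold updateEastGo
    rw [hrow, if_neg (by push_cast; omega)]
    rw [PySem.List.pyRange_one_cons (by push_cast; omega)]
    rcases hg : PySem.List.pyGet? row 0 with _ | t
    · simp only [scanRow, hg]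
    · simp only [scanRow, hg]
      by_cases h1 : t = "."
      · simp [h1]
      · by_cases h2 : t = "#"
        · simp [h1, h2]
        · rw [if_neg h1, if_neg h2, if_neg h1, if_neg h2]
          have := goW mm r0 c0 r row hrow m 0 (by omega) (by omega)
          rw [show (((m + 1 : Nat)) : Int) = (row.length : Int) by omega]
          simpa using this

-- first cycle from a non-negative column k: A inspects k+1, …, n-1, then 0, …, n-1.
theorem goM (mm : List (List String)) (r0 c0 r : Int) (row : List String)
    (hrow : (PySem.List.pyGet? mm r).getD [] = row) :
    ∀ (fuel : Nat) (k : Nat), k < row.length → fuel = (row.length - 1 - k) + row.length →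
      updateEastGo mm r0 c0 r fuel (k : Int) =
        scanRow row r0 c0 r
          (PySem.List.pyRange ((k : Int) + 1) (row.length : Int) 1 ++
           PySem.List.pyRange 0 (row.length : Int) 1) := by
  intro fuel
  induction fuel with
  | zero => intro k hk hf; omega
  | succ fuel ih =>
    intro k hk hf
    by_cases hlast : k + 1 = row.length
    · have hfl : fuel + 1 = row.length := by omega
      rw [hfl, goH mm r0 c0 r row hrow (by omega) (k : Int) (by omega)]
      rw [show PySem.List.pyRange ((k : Int) + 1) (row.length : Int) 1 = [] from
            PySem.List.pyRange_one_eq_nil (by omega), List.nil_append]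
    · have hk2 : k + 1 < row.length := by omega
      unfold updateEastGo
      rw [hrow, if_pos (by push_cast; omega)]
      rw [PySem.List.pyRange_one_cons (show (k : Int) + 1 < (row.length : Int) by push_cast; omega)]
      have hcast : (k : Int) + 1 = ((k + 1 : Nat) : Int) := by push_cast; ring
      rcases hg : PySem.List.pyGet? row ((k : Int) + 1) with _ | t
      · simp only [List.cons_append, scanRow, hg]
      · simp only [List.cons_append, scanRow, hg]
        by_cases h1 : t = "."
        · simp [h1]
        · by_cases h2 : t = "#"
          · simp [h1, h2]
          · rw [if_neg h1, if_neg h2, if_neg h1, if_neg h2]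
            rw [hcast, ih (k + 1) hk2 (by omega)]

-- negative start: from column c < 0, A inspects c+1, …, -1 (wrapping), then 0, …, n-1 twice over.
theorem goN (mm : List (List String)) (r0 c0 r : Int) (row : List String)
    (hrow : (PySem.List.pyGet? mm r).getD [] = row) (hn : 1 ≤ row.length) :
    ∀ (fuel : Nat) (c : Int), -((row.length : Int) + 1) ≤ c → c < 0 →
      fuel = (-1 - c).toNat + 2 * row.length →
      updateEastGo mm r0 c0 r fuel c =
        scanRow row r0 c0 r
          (PySem.List.pyRange (c + 1) (row.length : Int) 1 ++
           PySem.List.pyRange 0 (row.length : Int) 1) := by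
  intro fuel
  induction fuel with
  | zero => intro c h1 h2 hf; omega
  | succ fuel ih =>
    intro c h1 h2 hf
    by_cases hm1 : c = -1
    · subst hm1
      have hfl : fuel = (row.length - 1 - 0) + row.length := by omega
      unfold updateEastGo
      rw [hrow, if_pos (by push_cast; omega)]
      rw [PySem.List.pyRange_one_cons (show (-1 : Int) + 1 < (row.length : Int) by push_cast; omega)]
      norm_num
      rcases hg : PySem.List.pyGet? row 0 with _ | t
      · simp only [List.cons_append, scanRow, hg]
      · simp only [List.cons_append, scanRow, hg]
        by_cases hd1 : t = "."
        · simp [hd1]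
        · by_cases hd2 : t = "#"
          · simp [hd1, hd2]
          · rw [if_neg hd1, if_neg hd2, if_neg hd1, if_neg hd2]
            have := goM mm r0 c0 r row hrow fuel 0 (by omega) hfl
            simpa using this
    · unfold updateEastGo
      rw [hrow, if_pos (by push_cast; omega)]
      rw [PySem.List.pyRange_one_cons (show c + 1 < (row.length : Int) by push_cast; omega)]
      rcases hg : PySem.List.pyGet? row (c + 1) with _ | t
      · simp only [List.cons_append, scanRow, hg]
      · simp only [List.cons_append, scanRow, hg]
        by_cases hd1 : t = "."
        · simp [hd1]
        · by_cases hd2 : t = "#"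
          · simp [hd1, hd2]
          · rw [if_neg hd1, if_neg hd2, if_neg hd1, if_neg hd2]
            exact ih (c + 1) (by omega) (by omega) (by omega)

-- scanning a list twice over ends where scanning it once does
theorem scan_self_append (row : List String) (r0 c0 r : Int) (l : List Int) :
    scanRow row r0 c0 r (l ++ l) = scanRow row r0 c0 r l := by
  by_cases h : ∀ j ∈ l, pvStop row j = false
  · rw [scan_skip _ _ _ _ _ _ h]
  · push_neg at h
    rcases h with ⟨j, hj, hs⟩
    rw [scan_stop _ _ _ _ _ _ ⟨j, hj, by simpa using hs⟩]

-- ===== VERDICT (by name: the statement is the Claim_ definition above) =====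
theorem update_east_spec : Claim_equal_update_east := by
  intro mm r0 c0 r c _hdom hpre
  unfold Spec_update_east update_east update_east_alt
  obtain ⟨hhit, hc⟩ := hpre
  set row := (PySem.List.pyGet? mm r).getD [] with hrowdef
  have hn : 1 ≤ row.length := by
    rcases hhit with h | h <;> exact List.length_pos_of_mem h
  simp only []
  by_cases hcase : c < (row.length : Int) - 1
  · rw [if_pos hcase, if_pos hcase]
    by_cases hneg : c < 0
    · exact goN mm r0 c0 r row hrowdef.symm hn _ c hc hneg (by omega)
    · have hk : c = ((c.toNat : Nat) : Int) := by omega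
      rw [hk]
      rw [goM mm r0 c0 r row hrowdef.symm _ c.toNat (by omega) (by omega)]
  · rw [if_neg hcase, if_neg hcase]
    rw [goH mm r0 c0 r row hrowdef.symm hn c (by omega)]
    exact (scan_self_append row r0 c0 r (PySem.List.pyRange 0 (row.length : Int) 1)).symm
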